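-- pv_equiv track=rewrite | github.com/CertCh/DZ_SHIROKOV_ANDREY | DZ-main/Задачи 3/3.py | remove_excess_punctuation
-- ===== SOURCE A (Python) =====
-- def remove_excess_punctuation(string):
--   result = ""
--   last_char = string[-1]
--   if last_char == "?" or last_char == "!":
--     result = last_char
--     for char in string[-2::-1]:
--       if char != last_char:
--         result = char + result
--       else:
--         pass
--   else:
--     return string
--   return result
-- ===== SOURCE B (Python) =====
-- def remove_excess_punctuation(string):
--     last_char = string[-1]
--     if last_char == "?" or last_char == "!":
--         return string.replace(last_char, "") + last_char
--     return string
-- ===== Notes on version B (the rewrite author's own statement) =====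
-- stated objective: idiomatic
-- what changed: Replaces A's explicit reversed-slice loop with prepend accumulation by a single str.replace call that deletes every occurrence of the final mark, then re-appends one copy.
import Mathlib
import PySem

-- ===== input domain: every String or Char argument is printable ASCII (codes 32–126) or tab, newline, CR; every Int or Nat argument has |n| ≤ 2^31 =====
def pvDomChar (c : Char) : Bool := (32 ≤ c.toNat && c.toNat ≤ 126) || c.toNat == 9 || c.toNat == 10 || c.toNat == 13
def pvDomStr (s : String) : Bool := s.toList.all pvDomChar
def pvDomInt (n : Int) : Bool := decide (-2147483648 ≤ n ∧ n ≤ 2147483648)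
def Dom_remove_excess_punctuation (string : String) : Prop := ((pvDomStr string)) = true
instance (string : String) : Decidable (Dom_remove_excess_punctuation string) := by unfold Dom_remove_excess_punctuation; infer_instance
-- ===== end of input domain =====

-- B replaces A's reversed-slice loop with prepend accumulation by one str.replace (delete every final-mark occurrence) plus re-appending the mark (more idiomatic; same cost).
-- Pre_ excludes only the empty string, where A raises IndexError on string[-1] (and B does too).


-- ===== PORT A =====
-- literal port of A: string[-1]; if it is '?' or '!', start result = last_char and walk
-- string[-2::-1], prepending each char ≠ last_char; else return string unchanged.
def remove_excess_punctuation (string : String) : String :=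
  match PySem.List.pyGet? string.toList (-1) with
  | none => ""   -- string[-1] raises IndexError on ""; excluded by Pre_
  | some last_char =>
    if last_char = '?' ∨ last_char = '!' then
      -- string[-2::-1]; step -1 never makes slice? none, so getD [] is a totality guard only
      let rev := (PySem.List.slice? string.toList (some (-2)) none (-1)).getD []
      String.ofList (rev.foldl
        (fun result char => if char ≠ last_char then char :: result else result) [last_char])
    else string

-- ===== PORT B =====
-- literal port of Source B: string.replace(last_char, "") + last_char.
def remove_excess_punctuation_alt (string : String) : String :=
  match PySem.Str.pyGet? string (-1) with
  | none => ""   -- string[-1] raises IndexError on ""; excluded by Pre_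
  | some last_char =>
    if last_char = '?' ∨ last_char = '!' then
      PySem.Str.replace string (String.ofList [last_char]) "" ++ String.ofList [last_char]
    else string

-- ===== PRECONDITION & SPEC =====
-- Pre_ excludes only the empty string: there Python A raises IndexError on string[-1].
def Pre_remove_excess_punctuation (string : String) : Prop := string ≠ ""
instance (string : String) : Decidable (Pre_remove_excess_punctuation string) := by unfold Pre_remove_excess_punctuation; infer_instance
def pvWitness_remove_excess_punctuation : String := "hi!!"

def Spec_remove_excess_punctuation (string : String) (out : String) : Prop := out = remove_excess_punctuation_alt string
instance (string : String) (out : String) : Decidable (Spec_remove_excess_punctuation string out) := by unfold Spec_remove_excess_punctuation; infer_instance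

-- ===== CLAIM (what is proved, stated in full; the proofs are below) =====
def Claim_equal_remove_excess_punctuation : Prop := ∀ (string : String), Dom_remove_excess_punctuation string → Pre_remove_excess_punctuation string → Spec_remove_excess_punctuation string (remove_excess_punctuation string)

-- ===== LEMMAS AND PROOFS =====

-- filterMap over in-range getElem? of the index range is the identity
theorem pv_filterMap_getElem?_range {α : Type} (ys : List α) :
    List.filterMap (fun k => ys[k]?) (List.range ys.length) = ys := by
  induction ys using List.reverseRecOn with
  | nil => simp
  | append_singleton t a ih =>
    rw [List.length_append, List.length_singleton, List.range_succ, List.filterMap_append]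
    have h1 : List.filterMap (fun k => (t ++ [a])[k]?) (List.range t.length)
        = List.filterMap (fun k => t[k]?) (List.range t.length) := by
      apply List.filterMap_congr
      intro k hk
      rw [List.mem_range] at hk
      rw [List.getElem?_append_left hk]
    rw [h1, ih]
    simp

-- xs[-2::-1] is reverse (xs[:-1])
theorem pv_slice_neg2_rev {α : Type} (xs : List α) :
    PySem.List.slice? xs (some (-2)) none (-1) = some xs.dropLast.reverse := by
  simp only [PySem.List.slice?, PySem.List.sliceIndices]
  norm_num
  by_cases h : 1 < xs.length
  · rw [if_pos h]
    have hmax : max (-2 + (xs.length : Int)) (-1) = (xs.length : Int) - 2 := by omega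
    rw [hmax]
    have hcnt : ((xs.length : Int) - 2 + 1).toNat = xs.dropLast.reverse.length := by
      simp; omega
    rw [hcnt]
    conv_rhs => rw [← pv_filterMap_getElem?_range xs.dropLast.reverse]
    apply List.filterMap_congr
    intro k hk
    rw [List.mem_range] at hk
    simp only [List.length_reverse, List.length_dropLast] at hk
    have hidx : ((xs.length : Int) - 2 + -(k : Int)).toNat = xs.length - 2 - k := by omega
    rw [hidx]
    rw [List.getElem?_reverse (by simpa using hk), List.getElem?_dropLast]
    rw [if_pos (by simp; omega)]
    congr 1
    simp
    omega
  · rw [if_neg h]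
    have : xs.dropLast = [] := by
      cases xs with
      | nil => rfl
      | cons a t => cases t with
        | nil => rfl
        | cons b u => simp at h
    simp [this]

-- the reversed prepend-accumulating loop is filter ++ acc
theorem pv_foldl_prepend {p : Char} (ys : List Char) (acc : List Char) :
    ys.reverse.foldl (fun result char => if char ≠ p then char :: result else result) acc
      = ys.filter (fun c => c ≠ p) ++ acc := by
  induction ys generalizing acc with
  | nil => simp
  | cons y t ih =>
    rw [List.reverse_cons, List.foldl_append, ih]
    by_cases h : y = p <;> simp [h]

-- the replace worker with a one-char pattern and empty replacement is a filter
theorem pv_replace_go_singleton (p : Char) (l acc : List Char) (fuel : Nat)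
    (hf : l.length ≤ fuel) :
    PySem.Chars.replace.go [p] [] fuel l acc
      = acc.reverse ++ l.filter (fun c => c ≠ p) := by
  induction l generalizing acc fuel with
  | nil => cases fuel <;> simp [PySem.Chars.replace.go]
  | cons c t ih =>
    cases fuel with
    | zero => simp at hf
    | succ fuel =>
      rw [PySem.Chars.replace.go]
      by_cases h : c = p
      · subst h
        have hpre : List.isPrefixOf [c] (c :: t) = true := by simp [List.isPrefixOf]
        rw [if_pos hpre]
        simp only [List.length_singleton, List.drop_one, List.tail_cons, List.reverse_nil,
          List.nil_append]
        rw [ih acc fuel (by simpa using hf)]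
        simp
      · have hpre : List.isPrefixOf [p] (c :: t) = false := by
          simp [List.isPrefixOf]
          exact fun hcp => (h hcp.symm).elim
        rw [if_neg (by simp [hpre])]
        rw [ih (c :: acc) fuel (by simpa using hf)]
        simp [h]

-- s.replace(p, "") with a one-char pattern deletes exactly the occurrences of p
theorem pv_replace_singleton (s : List Char) (p : Char) :
    PySem.Chars.replace s [p] [] = s.filter (fun c => c ≠ p) := by
  rw [PySem.Chars.replace]
  simp only [List.isEmpty_cons, Bool.false_eq_true, if_false]
  exact pv_replace_go_singleton p s [] s.length le_rfl

-- ===== VERDICT (by name: the statement is the Claim_ definition above) =====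
theorem remove_excess_punctuation_spec : Claim_equal_remove_excess_punctuation := by
  intro string _ hpre
  unfold Spec_remove_excess_punctuation remove_excess_punctuation remove_excess_punctuation_alt
  have hne : string.toList ≠ [] := by
    simpa using hpre
  obtain ⟨l, hl⟩ : ∃ l, string.toList.getLast? = some l :=
    ⟨_, List.getLast?_eq_some_getLast hne⟩
  have hx : string.toList.dropLast ++ [l] = string.toList := by
    have := List.getLast?_eq_some_getLast hne
    rw [this] at hl
    rw [Option.some.injEq] at hl
    rw [← hl]
    exact List.dropLast_append_getLast hne
  have hB : PySem.Str.pyGet? string (-1) = some l := by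
    simp only [PySem.Str.pyGet?_eq, PySem.Chars.pyGet?_eq_listPyGet?]
    rw [PySem.List.pyGet?_neg_one, hl]
  rw [PySem.List.pyGet?_neg_one, hl, hB]
  by_cases hc : l = '?' ∨ l = '!'
  · simp only [hc, if_pos, pv_slice_neg2_rev, Option.getD_some, pv_foldl_prepend]
    -- both sides as String.ofList of the same character list
    have htB : (PySem.Str.replace string (String.ofList [l]) "" ++ String.ofList [l]).toList
        = string.toList.dropLast.filter (fun c => c ≠ l) ++ [l] := by
      rw [String.toList_append, PySem.Str.toList_replace]
      simp only [String.toList_ofList, String.toList_empty]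
      rw [pv_replace_singleton]
      conv_lhs => rw [← hx]
      rw [List.filter_append]
      simp
    calc String.ofList (string.toList.dropLast.filter (fun c => c ≠ l) ++ [l])
        = String.ofList ((PySem.Str.replace string (String.ofList [l]) "" ++ String.ofList [l]).toList) := by
          rw [htB]
      _ = PySem.Str.replace string (String.ofList [l]) "" ++ String.ofList [l] := by
          rw [String.ofList_toList]
  · simp only [hc]
    rfl
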